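-- pv_equiv track=rewrite | github.com/pareronia/adventofcode | src/main/python/aoc/collections.py | subtract_all
-- ===== SOURCE A (Python) =====
-- from typing import Any
--
-- def index_of_sublist(lst: list[Any], sub: list[Any]) -> int:
--     size = len(sub)
--     if len(lst) == 0 or size == 0 or len(lst) < size:
--         return -1
--     for idx in (i for i, e in enumerate(lst) if e == sub[0]):
--         if lst[idx : idx + size] == sub:  # noqa E203
--             return idx
--     return -1
--
-- def indexes_of_sublist(lst: list[Any], sub: list[Any]) -> list[int]:
--     idxs: list[int] = []
--     i = 0
--     while i + len(sub) <= len(lst):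
--         idx = index_of_sublist(lst[i:], sub)
--         if idx == -1:
--             break
--         idxs.append(i + idx)
--         i += idx + len(sub)
--     return idxs
--
-- def subtract_all(lst: list[Any], sub: list[Any]) -> list[Any]:
--     ans = list[Any]()
--     i = 0
--     for idx in indexes_of_sublist(lst, sub):
--         while i < idx:
--             ans.append(lst[i])
--             i += 1
--         i += len(sub)
--     ans += lst[i:][:]
--     return ans
-- ===== SOURCE B (Python) =====
-- def subtract_all(lst, sub):
--     m = len(sub)
--     if m == 0:
--         return list(lst)
--     s0 = sub[0]
--     ans = []
--     i = 0
--     n = len(lst)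
--     while i < n:
--         if lst[i] == s0 and lst[i:i + m] == sub:
--             i += m
--         else:
--             ans.append(lst[i])
--             i += 1
--     return ans
-- ===== Notes on version B (the rewrite author's own statement) =====
-- stated objective: simpler
-- what changed: A finds all non-overlapping match indexes via two helper functions with repeated list slicing and then copies the gaps between them; B is a single left-to-right scan that skips each match in place and appends non-matching elements directly.
import Mathlib
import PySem

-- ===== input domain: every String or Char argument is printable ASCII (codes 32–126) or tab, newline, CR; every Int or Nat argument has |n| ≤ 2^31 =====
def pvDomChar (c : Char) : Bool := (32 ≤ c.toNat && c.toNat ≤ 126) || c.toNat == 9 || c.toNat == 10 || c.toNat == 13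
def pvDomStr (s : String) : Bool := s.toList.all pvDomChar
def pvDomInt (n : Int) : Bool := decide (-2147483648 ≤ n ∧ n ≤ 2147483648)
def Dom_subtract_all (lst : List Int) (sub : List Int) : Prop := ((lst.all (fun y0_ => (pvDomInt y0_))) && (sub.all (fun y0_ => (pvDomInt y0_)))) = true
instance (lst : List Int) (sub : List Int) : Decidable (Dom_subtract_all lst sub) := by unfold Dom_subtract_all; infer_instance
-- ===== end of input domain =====

-- B replaces A's two-helper "collect match indexes, then copy the gaps" pipeline by a single
-- left-to-right scan that skips matches in place; same return value, no speed claim.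

-- ===== PORT A =====
-- inner scan of index_of_sublist: for the positions of lst, filtered on e == sub[0],
-- check lst[idx:idx+size] == sub; the returned index is rebuilt by +1 shifting.
def iofGo (sub : List Int) : List Int → Int
  | [] => -1
  | e :: rest =>
    if e = sub.headI ∧ (e :: rest).take sub.length = sub then 0
    else if iofGo sub rest = -1 then -1 else iofGo sub rest + 1

def index_of_sublist (lst : List Int) (sub : List Int) : Int :=
  if lst.length = 0 ∨ sub.length = 0 ∨ lst.length < sub.length then -1
  else iofGo sub lst

-- the while loop of indexes_of_sublist; fuel only makes the loop total (i strictly grows each pass)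
def idxsGo (lst sub : List Int) : Nat → Nat → List Int → List Int
  | 0, _, acc => acc
  | fuel + 1, i, acc =>
    if i + sub.length ≤ lst.length then
      -- idx := index_of_sublist(lst[i:], sub), inlined
      if index_of_sublist (lst.drop i) sub = -1 then acc
      else idxsGo lst sub fuel
        (i + (index_of_sublist (lst.drop i) sub).toNat + sub.length)
        (acc ++ [(i : Int) + index_of_sublist (lst.drop i) sub])
    else acc

def indexes_of_sublist (lst sub : List Int) : List Int :=
  idxsGo lst sub (lst.length + 1) 0 []

-- the inner "while i < idx: ans.append(lst[i]); i += 1" loop of subtract_all;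
-- lst.getD i 0 is exact here: i < idx and idx is a valid match index, so i is in range
def copyGo (lst : List Int) (idx : Int) (i : Nat) (ans : List Int) : List Int :=
  if (i : Int) < idx then copyGo lst idx (i + 1) (ans ++ [lst.getD i 0])
  else ans
termination_by idx.toNat - i
decreasing_by omega

-- the outer "for idx in indexes_of_sublist(...)" loop of subtract_all
def saGo (lst sub : List Int) : List Int → Nat → List Int → List Int
  | [], i, ans => ans ++ lst.drop i
  | idx :: rest, i, ans => saGo lst sub rest (idx.toNat + sub.length) (copyGo lst idx i ans)

def subtract_all (lst : List Int) (sub : List Int) : List Int :=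
  saGo lst sub (indexes_of_sublist lst sub) 0 []

-- ===== PORT B =====
-- the while loop of B for non-empty sub = s :: ss: at each position either skip a match or emit
-- one element; the cheap first-element test guards the slice comparison, as in Source B
def altGo (s : Int) (ss : List Int) : List Int → List Int
  | [] => []
  | x :: rest =>
    if x = s ∧ (x :: rest).take (s :: ss).length = s :: ss then
      altGo s ss ((x :: rest).drop (s :: ss).length)
    else x :: altGo s ss rest
termination_by l => l.length
decreasing_by
  all_goals simp

def subtract_all_alt (lst : List Int) (sub : List Int) : List Int :=
  match sub with
  | [] => lst
  | s :: ss => altGo s ss lst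

-- ===== PRECONDITION & SPEC =====
def Spec_subtract_all (lst : List Int) (sub : List Int) (out : List Int) : Prop := out = subtract_all_alt lst sub
instance (lst : List Int) (sub : List Int) (out : List Int) : Decidable (Spec_subtract_all lst sub out) := by unfold Spec_subtract_all; infer_instance

-- ===== CLAIM (what is proved, stated in full; the proofs are below) =====
def Claim_equal_subtract_all : Prop := ∀ (lst : List Int) (sub : List Int), Dom_subtract_all lst sub → Spec_subtract_all lst sub (subtract_all lst sub)

-- ===== LEMMAS AND PROOFS =====

-- first match index of sub = s::ss in l, as an Option Nat (proof-side characterisation)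
def fIdx (s : Int) (ss : List Int) : List Int → Option Nat
  | [] => none
  | x :: rest =>
    if (x :: rest).take (s :: ss).length = s :: ss then some 0
    else (fIdx s ss rest).map (· + 1)

theorem iofGo_eq_fIdx (s : Int) (ss : List Int) (l : List Int) :
    iofGo (s :: ss) l = (fIdx s ss l).elim (-1) (fun k => (k : Int)) := by
  induction l with
  | nil => simp [iofGo, fIdx]
  | cons x rest ih =>
    by_cases h : (x :: rest).take (s :: ss).length = s :: ss
    · have hx : x = (s :: ss).headI := by
        have := congrArg List.headI h
        simpa [List.take_succ_cons] using this
      have hc : rest.take ss.length = ss := by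
        have := congrArg List.tail h
        simpa [List.take_succ_cons] using this
      simp [iofGo, fIdx, hx, hc]
    · have hx : ¬ (x = (s :: ss).headI ∧ (x :: rest).take (s :: ss).length = s :: ss) := by
        intro ⟨_, h2⟩; exact h h2
      rw [iofGo, if_neg hx, fIdx, if_neg h, ih]
      cases hf : fIdx s ss rest with
      | none => simp
      | some k =>
        have : ((k : Int)) ≠ -1 := by omega
        simp [this]

theorem fIdx_none_of_short (s : Int) (ss : List Int) (l : List Int)
    (h : l.length < (s :: ss).length) : fIdx s ss l = none := by
  induction l with
  | nil => simp [fIdx]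
  | cons x rest ih =>
    have hne : (x :: rest).take (s :: ss).length ≠ s :: ss := by
      intro he
      have hlen := congrArg List.length he
      simp [List.length_take, List.length_cons] at hlen h
      omega
    rw [fIdx, if_neg hne, ih (by simp [List.length_cons] at h ⊢; omega)]
    rfl

theorem fIdx_some_le (s : Int) (ss : List Int) (l : List Int) (k : Nat)
    (h : fIdx s ss l = some k) : k + (s :: ss).length ≤ l.length := by
  induction l generalizing k with
  | nil => simp [fIdx] at h
  | cons x rest ih =>
    rw [fIdx] at h
    split at h
    · rename_i ht
      have := congrArg List.length ht
      simp at this h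
      subst h
      simp
      omega
    · cases hf : fIdx s ss rest with
      | none => simp [hf] at h
      | some k' =>
        simp [hf] at h
        have := ih k' hf
        subst h
        simp at this ⊢
        omega

theorem index_eq_fIdx (s : Int) (ss : List Int) (l : List Int) :
    index_of_sublist l (s :: ss) = (fIdx s ss l).elim (-1) (fun k => (k : Int)) := by
  unfold index_of_sublist
  by_cases hg : l.length = 0 ∨ (s :: ss).length = 0 ∨ l.length < (s :: ss).length
  · rw [if_pos hg]
    rcases hg with h0 | h0 | h0
    · have : l = [] := List.length_eq_zero_iff.mp h0
      subst this; simp [fIdx]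
    · simp at h0
    · rw [fIdx_none_of_short s ss l h0]; rfl
  · rw [if_neg hg]
    exact iofGo_eq_fIdx s ss l

-- accumulator lemmas
theorem copyGo_acc (lst : List Int) (idx : Int) : ∀ (i : Nat) (ans : List Int),
    copyGo lst idx i ans = ans ++ copyGo lst idx i [] := by
  intro i ans
  induction hn : idx.toNat - i generalizing i ans with
  | zero =>
    have h : ¬ ((i : Int) < idx) := by omega
    conv_lhs => rw [copyGo]
    conv_rhs => rw [copyGo]
    simp [h]
  | succ n ih =>
    by_cases h : (i : Int) < idx
    · conv_lhs => rw [copyGo]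
      conv_rhs => rw [copyGo]
      rw [if_pos h, if_pos h, ih (i+1) (ans ++ [lst.getD i 0]) (by omega),
        ih (i+1) ([] ++ [lst.getD i 0]) (by omega)]
      simp
    · conv_lhs => rw [copyGo]
      conv_rhs => rw [copyGo]
      simp [h]

theorem saGo_acc (lst sub : List Int) : ∀ (idxs : List Int) (i : Nat) (ans : List Int),
    saGo lst sub idxs i ans = ans ++ saGo lst sub idxs i [] := by
  intro idxs
  induction idxs with
  | nil => intro i ans; simp [saGo]
  | cons idx rest ih =>
    intro i ans
    rw [saGo, saGo, ih _ (copyGo lst idx i ans), ih _ (copyGo lst idx i []),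
      copyGo_acc]
    simp

theorem idxsGo_acc (lst sub : List Int) : ∀ (fuel : Nat) (i : Nat) (acc : List Int),
    idxsGo lst sub fuel i acc = acc ++ idxsGo lst sub fuel i [] := by
  intro fuel
  induction fuel with
  | zero => intro i acc; simp [idxsGo]
  | succ n ih =>
    intro i acc
    simp only [idxsGo]
    split
    · split
      · simp
      · rw [ih _ (acc ++ _), ih _ ([] ++ _)]
        simp
    · simp

-- fuel stability of the indexes loop (sub non-empty)
theorem idxsGo_fuel (lst : List Int) (s : Int) (ss : List Int) :
    ∀ (f1 f2 i : Nat), lst.length < f1 + i → lst.length < f2 + i →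
    idxsGo lst (s :: ss) f1 i [] = idxsGo lst (s :: ss) f2 i [] := by
  have hm : 1 ≤ (s :: ss).length := by simp
  intro f1
  induction f1 with
  | zero =>
    intro f2 i h1 h2
    have hc : ¬ (i + (s :: ss).length ≤ lst.length) := by omega
    cases f2 with
    | zero => rfl
    | succ n => rw [idxsGo, idxsGo, if_neg hc]
  | succ n ih =>
    intro f2 i h1 h2
    cases f2 with
    | zero =>
      have hc : ¬ (i + (s :: ss).length ≤ lst.length) := by omega
      rw [idxsGo, idxsGo, if_neg hc]
    | succ n2 =>
      rw [idxsGo, idxsGo]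
      split
      · rename_i hc
        split
        · rfl
        · rename_i hidx
          rw [idxsGo_acc _ _ n, idxsGo_acc _ _ n2,
            ih n2 _ (by omega) (by omega)]
      · rfl

-- shift lemma: the indexes loop only looks at lst.drop of the running index
theorem idxsGo_shift (s : Int) (ss : List Int) (lst : List Int) :
    ∀ (fuel j i : Nat),
    idxsGo lst (s :: ss) fuel (j + i) [] =
      (idxsGo (lst.drop j) (s :: ss) fuel i []).map (fun k => (j : Int) + k) := by
  intro fuel
  induction fuel with
  | zero => intro j i; simp [idxsGo]
  | succ n ih =>
    intro j i
    rw [idxsGo, idxsGo]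
    have hlen : (lst.drop j).length = lst.length - j := by simp
    have hdd : lst.drop (j + i) = (lst.drop j).drop i := by
      rw [List.drop_drop]
    by_cases hc : (j + i) + (s :: ss).length ≤ lst.length
    · have hc' : i + (s :: ss).length ≤ (lst.drop j).length := by
        rw [hlen]; simp only [List.length_cons] at hc ⊢; omega
      rw [if_pos hc, if_pos hc', hdd]
      split
      · simp
      · rename_i hidx
        rw [idxsGo_acc lst _ n, idxsGo_acc (lst.drop j) _ n]
        have harith : j + i + (index_of_sublist ((lst.drop j).drop i) (s :: ss)).toNat
            + (s :: ss).length
            = j + (i + (index_of_sublist ((lst.drop j).drop i) (s :: ss)).toNat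
              + (s :: ss).length) := by omega
        rw [harith, ih j _]
        simp
        ring
    · have hc' : ¬ (i + (s :: ss).length ≤ (lst.drop j).length) := by
        rw [hlen]; simp only [List.length_cons] at hc ⊢; omega
      rw [if_neg hc, if_neg hc']
      simp

-- entries of the indexes loop are non-negative
theorem idxsGo_nonneg (lst : List Int) (s : Int) (ss : List Int) :
    ∀ (fuel i : Nat) (k : Int), k ∈ idxsGo lst (s :: ss) fuel i [] → 0 ≤ k := by
  intro fuel
  induction fuel with
  | zero => intro i k hk; simp [idxsGo] at hk
  | succ n ih =>
    intro i k hk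
    rw [idxsGo] at hk
    split at hk
    · split at hk
      · simp at hk
      · rename_i hidx
        rw [idxsGo_acc] at hk
        simp at hk
        rcases hk with hk | hk
        · subst hk
          rw [index_eq_fIdx] at hidx ⊢
          cases hf : fIdx s ss ((lst.drop i)) with
          | none => rw [hf] at hidx; simp at hidx
          | some m => simp only [Option.elim_some]; omega
        · exact ih _ k hk
    · simp at hk

theorem indexes_nonneg (lst : List Int) (s : Int) (ss : List Int) :
    ∀ k ∈ indexes_of_sublist lst (s :: ss), 0 ≤ k :=
  fun k hk => idxsGo_nonneg lst s ss (lst.length + 1) 0 k hk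

-- one pass of the indexes loop: a first match at k is recorded, and the rest are
-- the (shifted) indexes of the remainder after the match
theorem indexes_none (s : Int) (ss : List Int) (l : List Int)
    (hf : fIdx s ss l = none) : indexes_of_sublist l (s :: ss) = [] := by
  rw [indexes_of_sublist, idxsGo]
  split
  · have hidx : index_of_sublist (l.drop 0) (s :: ss) = -1 := by
      simp [index_eq_fIdx, hf]
    rw [hidx]
    simp
  · rfl

theorem indexes_step (s : Int) (ss : List Int) (l : List Int) (k : Nat)
    (hf : fIdx s ss l = some k) :
    indexes_of_sublist l (s :: ss) =
      (k : Int) :: (indexes_of_sublist (l.drop (k + (s :: ss).length)) (s :: ss)).map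
        (fun j => ((k + (s :: ss).length : Nat) : Int) + j) := by
  have hm : 1 ≤ (s :: ss).length := by simp
  have hkm := fIdx_some_le s ss l k hf
  have hidx : index_of_sublist (l.drop 0) (s :: ss) = (k : Int) := by
    simp [index_eq_fIdx, hf]
  have hne : ((k : Int)) ≠ -1 := by omega
  rw [indexes_of_sublist, idxsGo, if_pos (by omega : 0 + (s :: ss).length ≤ l.length),
    hidx, if_neg hne, idxsGo_acc]
  have harith : 0 + ((k : Int)).toNat + (s :: ss).length = (k + (s :: ss).length) + 0 := by
    omega
  rw [harith]
  have hstab : idxsGo l (s :: ss) l.length ((k + (s :: ss).length) + 0) [] =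
      idxsGo l (s :: ss) (l.length + 1) ((k + (s :: ss).length) + 0) [] :=
    idxsGo_fuel l s ss _ _ _ (by omega) (by omega)
  rw [hstab, idxsGo_shift s ss l (l.length + 1) (k + (s :: ss).length) 0]
  have hstab2 : idxsGo (l.drop (k + (s :: ss).length)) (s :: ss) (l.length + 1) 0 [] =
      idxsGo (l.drop (k + (s :: ss).length)) (s :: ss)
        ((l.drop (k + (s :: ss).length)).length + 1) 0 [] :=
    idxsGo_fuel _ s ss _ _ _ (by simp only [List.length_drop]; omega)
      (by simp only [List.length_drop]; omega)
  rw [hstab2, ← indexes_of_sublist]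
  simp

-- copyGo copies the in-range segment lst[i:idx]
theorem copyGo_take (lst : List Int) (idx : Int) (hle : idx.toNat ≤ lst.length) :
    ∀ (i : Nat) (ans : List Int),
    copyGo lst idx i ans = ans ++ ((lst.drop i).take (idx.toNat - i)) := by
  intro i ans
  induction hn : idx.toNat - i generalizing i ans with
  | zero =>
    rw [copyGo]
    have : ¬ ((i : Int) < idx) := by omega
    simp [this]
  | succ n ih =>
    have hi : (i : Int) < idx := by omega
    rw [copyGo, if_pos hi, ih (i + 1) _ (by omega)]
    have hiL : i < lst.length := by omega
    have hd : lst.drop i = lst[i] :: lst.drop (i + 1) := List.drop_eq_getElem_cons hiL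
    have hg : lst.getD i 0 = lst[i] := by
      simp [List.getD_eq_getElem?_getD, List.getElem?_eq_getElem hiL]
    rw [hg, hd, List.take_succ_cons]
    simp

-- shift lemma for the assembly loop
theorem saGo_shift (lst sub : List Int) :
    ∀ (idxs : List Int) (j i : Nat) (ans : List Int),
    (∀ k ∈ idxs, 0 ≤ k) →
    saGo lst sub (idxs.map (fun k => (j : Int) + k)) (j + i) ans =
      saGo (lst.drop j) sub idxs i ans := by
  intro idxs
  induction idxs with
  | nil =>
    intro j i ans _
    simp [saGo, List.drop_drop]
  | cons idx rest ih =>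
    intro j i ans hnn
    have hidx : 0 ≤ idx := hnn idx (by simp)
    rw [List.map_cons, saGo, saGo]
    have hcopy : copyGo lst ((j : Int) + idx) (j + i) ans = copyGo (lst.drop j) idx i ans := by
      clear ih
      induction hm : idx.toNat - i generalizing i ans with
      | zero =>
        have h1 : ¬ ((i : Int) < idx) := by omega
        have h2 : ¬ (((j + i : Nat) : Int) < (j : Int) + idx) := by push_cast; omega
        conv_lhs => rw [copyGo]
        conv_rhs => rw [copyGo]
        simp [h1]
      | succ n ihc =>
        have h1 : (i : Int) < idx := by omega
        have h2 : (((j + i : Nat) : Int) < (j : Int) + idx) := by push_cast; omega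
        conv_lhs => rw [copyGo]
        conv_rhs => rw [copyGo]
        rw [if_pos h2, if_pos h1]
        have hg : lst.getD (j + i) 0 = (lst.drop j).getD i 0 := by
          simp [List.getD_eq_getElem?_getD, List.getElem?_drop]
        rw [hg]
        have h3 : j + i + 1 = j + (i + 1) := by omega
        rw [h3]
        exact ihc (i + 1) _ (by omega)
    rw [hcopy]
    have harith : ((j : Int) + idx).toNat + sub.length = j + (idx.toNat + sub.length) := by omega
    rw [harith]
    exact ih j (idx.toNat + sub.length) _ (fun k hk => hnn k (by simp [hk]))

theorem saGo_shift0 (lst sub : List Int) (idxs : List Int) (j : Nat) (ans : List Int)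
    (hnn : ∀ k ∈ idxs, 0 ≤ k) :
    saGo lst sub (idxs.map (fun k => (j : Int) + k)) j ans =
      saGo (lst.drop j) sub idxs 0 ans := by
  have := saGo_shift lst sub idxs j 0 ans hnn
  simpa using this

theorem subtract_all_nil (sub : List Int) : subtract_all [] sub = [] := by
  cases sub with
  | nil => simp [subtract_all, indexes_of_sublist, idxsGo, index_of_sublist, saGo]
  | cons s ss =>
    rw [subtract_all, indexes_none s ss [] (by rw [fIdx])]
    simp [saGo]

theorem subtract_all_empty_sub (lst : List Int) : subtract_all lst [] = lst := by
  rw [subtract_all]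
  have : indexes_of_sublist lst [] = [] := by
    rw [indexes_of_sublist, idxsGo]
    simp [index_of_sublist]
  rw [this]
  simp [saGo]

-- recurrence, match case: a match at the head is consumed
theorem subtract_all_match (s : Int) (ss : List Int) (l : List Int)
    (h : l.take (s :: ss).length = s :: ss) :
    subtract_all l (s :: ss) = subtract_all (l.drop (s :: ss).length) (s :: ss) := by
  have hm : (s :: ss).length ≤ l.length := by
    have := congrArg List.length h
    simp only [List.length_take] at this
    omega
  have hf0 : fIdx s ss l = some 0 := by
    cases l with
    | nil => simp at hm
    | cons x rest => rw [fIdx, if_pos h]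
  rw [subtract_all, indexes_step s ss l 0 hf0]
  simp only [Nat.zero_add, Nat.cast_zero]
  rw [saGo]
  have hcopy0 : copyGo l (0 : Int) 0 [] = [] := by rw [copyGo]; simp
  rw [hcopy0]
  simp only [Int.toNat_zero, Nat.zero_add]
  rw [saGo_shift0 l (s :: ss) _ (s :: ss).length [] (indexes_nonneg _ s ss)]
  conv_rhs => rw [subtract_all]

-- recurrence, no-match case: the head element is kept
theorem subtract_all_nomatch (s : Int) (ss : List Int) (x : Int) (rest : List Int)
    (h : (x :: rest).take (s :: ss).length ≠ s :: ss) :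
    subtract_all (x :: rest) (s :: ss) = x :: subtract_all rest (s :: ss) := by
  have hm : 1 ≤ (s :: ss).length := by simp
  have hfx : fIdx s ss (x :: rest) = (fIdx s ss rest).map (· + 1) := by
    rw [fIdx, if_neg h]
  cases hf : fIdx s ss rest with
  | none =>
    have hfx0 : fIdx s ss (x :: rest) = none := by rw [hfx, hf]; rfl
    rw [subtract_all, indexes_none s ss _ hfx0, subtract_all, indexes_none s ss _ hf]
    simp [saGo]
  | some k =>
    have hkm := fIdx_some_le s ss rest k hf
    have hfx1 : fIdx s ss (x :: rest) = some (k + 1) := by rw [hfx, hf]; rfl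
    rw [subtract_all, indexes_step s ss _ (k + 1) hfx1,
      subtract_all, indexes_step s ss _ k hf]
    have hdd : (x :: rest).drop (k + 1 + (s :: ss).length) = rest.drop (k + (s :: ss).length) := by
      have : k + 1 + (s :: ss).length = (k + (s :: ss).length) + 1 := by omega
      rw [this]
      simp
    rw [hdd, saGo, saGo]
    have hc1 : copyGo (x :: rest) ((k + 1 : Nat) : Int) 0 [] =
        [] ++ (((x :: rest).drop 0).take (((k + 1 : Nat) : Int).toNat - 0)) := by
      apply copyGo_take
      simp only [Int.toNat_natCast, List.length_cons]
      simp only [List.length_cons] at hkm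
      omega
    have hc2 : copyGo rest ((k : Nat) : Int) 0 [] =
        [] ++ ((rest.drop 0).take (((k : Nat) : Int).toNat - 0)) := by
      apply copyGo_take
      omega
    rw [hc1, hc2]
    simp only [List.drop_zero, List.nil_append, Nat.sub_zero, Int.toNat_natCast]
    rw [saGo_shift0 (x :: rest) (s :: ss) _ (k + 1 + (s :: ss).length) _
        (indexes_nonneg _ s ss),
      saGo_shift0 rest (s :: ss) _ (k + (s :: ss).length) _
        (indexes_nonneg _ s ss), hdd]
    rw [saGo_acc _ _ _ 0 ((x :: rest).take (k + 1)),
      saGo_acc _ _ _ 0 (rest.take k)]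
    simp [List.take_succ_cons]

-- main equivalence for non-empty sub, by strong induction on the list length
theorem subtract_all_eq_altGo (s : Int) (ss : List Int) (l : List Int) :
    subtract_all l (s :: ss) = altGo s ss l := by
  induction hn : l.length using Nat.strong_induction_on generalizing l with
  | _ n ih =>
    cases l with
    | nil => rw [subtract_all_nil, altGo]
    | cons x rest =>
      by_cases h : (x :: rest).take (s :: ss).length = s :: ss
      · have hx : x = s := by
          have := congrArg List.headI h
          simpa [List.take_succ_cons] using this
        rw [subtract_all_match s ss (x :: rest) h, altGo, if_pos ⟨hx, h⟩]
        have hm : (s :: ss).length ≤ (x :: rest).length := by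
          have := congrArg List.length h
          simp only [List.length_take] at this
          omega
        apply ih ((x :: rest).drop (s :: ss).length).length _ _ rfl
        subst hn
        simp only [List.length_drop, List.length_cons] at hm ⊢
        have hm1 : 1 ≤ (s :: ss).length := by simp
        omega
      · rw [subtract_all_nomatch s ss x rest h, altGo,
          if_neg (fun hc => h hc.2)]
        congr 1
        apply ih rest.length _ _ rfl
        subst hn
        simp

-- ===== VERDICT (by name: the statement is the Claim_ definition above) =====
theorem subtract_all_spec : Claim_equal_subtract_all := by
  intro lst sub _
  unfold Spec_subtract_all subtract_all_alt
  cases sub with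
  | nil => exact subtract_all_empty_sub lst
  | cons s ss => exact subtract_all_eq_altGo s ss lst
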